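-- pv_equiv track=rewrite | github.com/individual-brain-charting/public_protocols | aomic/protocol/paradigm_descriptors.py | check_presence
-- ===== SOURCE A (Python) =====
-- def check_presence(filename, list_of_files):
--     if filename in list_of_files:
--         count = 0
--         for f in list_of_files:
--             if f==filename:
--                 count+=1
--         filename = filename.split('.')[0]+'('+str(count)+').'+filename.split('.')[1]
--         return check_presence(filename,list_of_files)
--     else:
--         return filename
-- ===== SOURCE B (Python) =====
-- def check_presence(filename, list_of_files):
--     # Build a multiplicity index once, then rename iteratively:
--     # removes A's per-recursion membership scan and counting scan.
--     counts = {}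
--     for f in list_of_files:
--         counts[f] = counts.get(f, 0) + 1
--     while filename in counts:
--         parts = filename.split('.')
--         filename = parts[0] + '(' + str(counts[filename]) + ').' + parts[1]
--     return filename
-- ===== Notes on version B (the rewrite author's own statement) =====
-- stated objective: alternative
-- what changed: Replaces the tail recursion that rescans the list twice per step (membership test + counting loop) with a multiplicity dictionary built in one pass and an iterative while-loop doing O(1) lookups per rename.
import Mathlib
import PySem

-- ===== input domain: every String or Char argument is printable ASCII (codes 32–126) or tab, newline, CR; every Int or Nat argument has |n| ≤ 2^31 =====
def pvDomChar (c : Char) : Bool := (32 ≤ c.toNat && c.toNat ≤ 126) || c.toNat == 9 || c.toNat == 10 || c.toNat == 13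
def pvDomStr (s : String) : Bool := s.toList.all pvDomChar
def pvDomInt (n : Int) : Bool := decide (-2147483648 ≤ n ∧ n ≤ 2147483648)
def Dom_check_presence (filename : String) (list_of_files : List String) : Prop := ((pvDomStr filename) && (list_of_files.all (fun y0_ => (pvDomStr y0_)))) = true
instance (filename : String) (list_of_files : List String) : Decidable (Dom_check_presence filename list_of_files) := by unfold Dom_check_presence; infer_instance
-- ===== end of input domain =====

-- B builds the multiplicity dictionary once and renames in a while-loop instead of
-- re-scanning the list on every tail-recursive call; return values agree on Pre_.
-- Both ports carry an explicit fuel parameter purely as a totality guard (the Python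
-- recursion/loop always terminates because each rename after the first strictly
-- lengthens the name; the fuel below exceeds any possible number of iterations).

-- rename step shared shape: parts = filename.split('.'); parts[0]+'('+str(c)+').'+parts[1]
def pvRename (filename : String) (c : Int) : String :=
  let parts := (PySem.Str.split? filename ".").getD []
  PySem.List.pyGetD parts 0 "" ++ "(" ++ PySem.Int.toStr c ++ ")." ++ PySem.List.pyGetD parts 1 ""

-- total fuel bound: more than any name length ever reachable while still colliding
def pvFuel (filename : String) (list_of_files : List String) : Nat :=
  filename.toList.length + (list_of_files.map (fun s => s.toList.length)).sum + list_of_files.length + 2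

-- ===== PORT A =====
def check_presence_go (fuel : Nat) (filename : String) (list_of_files : List String) : String :=
  match fuel with
  | 0 => filename
  | fuel + 1 =>
    if filename ∈ list_of_files then
      let count : Int := list_of_files.foldl (fun acc f => if f == filename then acc + 1 else acc) 0
      check_presence_go fuel (pvRename filename count) list_of_files
    else
      filename

def check_presence (filename : String) (list_of_files : List String) : String :=
  check_presence_go (pvFuel filename list_of_files) filename list_of_files

-- ===== PORT B =====
def check_presence_alt_go (fuel : Nat) (counts : PySem.Dict String Int) (filename : String) : String :=
  match fuel with
  | 0 => filename
  | fuel + 1 =>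
    if counts.contains filename then
      check_presence_alt_go fuel counts (pvRename filename (counts.getD filename 0))
    else
      filename

def check_presence_alt (filename : String) (list_of_files : List String) : String :=
  let counts := list_of_files.foldl (fun d f => d.insert f (d.getD f 0 + 1)) PySem.Dict.empty
  check_presence_alt_go (pvFuel filename list_of_files) counts filename

-- ===== PRECONDITION & SPEC =====
-- Pre_ excludes only the inputs on which A raises IndexError: a filename that is in the
-- list but contains no '.' (split('.')[1] is out of range); B raises there too.
def Pre_check_presence (filename : String) (list_of_files : List String) : Prop :=
  filename ∈ list_of_files → PySem.Str.isIn "." filename = true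
instance (filename : String) (list_of_files : List String) : Decidable (Pre_check_presence filename list_of_files) := by unfold Pre_check_presence; infer_instance

def pvWitness_check_presence : String × List String := ("a.txt", ["a.txt", "b.txt"])

def Spec_check_presence (filename : String) (list_of_files : List String) (out : String) : Prop := out = check_presence_alt filename list_of_files
instance (filename : String) (list_of_files : List String) (out : String) : Decidable (Spec_check_presence filename list_of_files out) := by unfold Spec_check_presence; infer_instance

-- ===== CLAIM (what is proved, stated in full; the proofs are below) =====
def Claim_equal_check_presence : Prop := ∀ (filename : String) (list_of_files : List String), Dom_check_presence filename list_of_files → Pre_check_presence filename list_of_files → Spec_check_presence filename list_of_files (check_presence filename list_of_files)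

-- ===== LEMMAS AND PROOFS =====

lemma go_eq (fuel : Nat) (l : List String) :
    ∀ filename, check_presence_go fuel filename l
      = check_presence_alt_go fuel (PySem.Dict.counter l) filename := by
  induction fuel with
  | zero => intro filename; rfl
  | succ n ih =>
    intro filename
    simp only [check_presence_go, check_presence_alt_go,
      PySem.Dict.contains_counter, PySem.Dict.getD_counter,
      PySem.List.foldl_beq_add_one, List.contains_iff_mem]
    split_ifs with h
    · rw [ih]; norm_num
    · rfl

-- ===== VERDICT (by name: the statement is the Claim_ definition above) =====
theorem check_presence_spec : Claim_equal_check_presence := by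
  intro filename l _ _
  unfold Spec_check_presence check_presence check_presence_alt
  rw [PySem.Dict.foldl_insert_getD_add_one_eq_counter, go_eq]
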